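-- pv_equiv track=rewrite | github.com/jcolinpatrick/kryptos | scripts/grille/e_morse_palindrome_analysis_v2.py | palindrome_mismatch_analysis
-- ===== SOURCE A (Python) =====
-- def palindrome_mismatch_analysis(bs):
--     """Detailed analysis of palindrome mismatches."""
--     n = len(bs)
--     rev = bs[::-1]
--     mismatches = []
--     for i in range(n):
--         if bs[i] != rev[i]:
--             mismatches.append(i)
--     return mismatches
-- ===== SOURCE B (Python) =====
-- def palindrome_mismatch_analysis(bs):
--     """Detailed analysis of palindrome mismatches."""
--     left = []
--     right = []
--     i = 0
--     j = len(bs) - 1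
--     while i < j:
--         if bs[i] != bs[j]:
--             left.append(i)
--             right.append(j)
--         i += 1
--         j -= 1
--     right.reverse()
--     return left + right
-- ===== Notes on version B (the rewrite author's own statement) =====
-- stated objective: alternative
-- what changed: B replaces A's reversed-copy-plus-full-range scan by a two-pointer while loop that walks i and j inward from both ends, collecting mismatching low indices and their mirror high indices, then returns left + reversed(right); no reversed copy and only n//2 comparisons.
import Mathlib
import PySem

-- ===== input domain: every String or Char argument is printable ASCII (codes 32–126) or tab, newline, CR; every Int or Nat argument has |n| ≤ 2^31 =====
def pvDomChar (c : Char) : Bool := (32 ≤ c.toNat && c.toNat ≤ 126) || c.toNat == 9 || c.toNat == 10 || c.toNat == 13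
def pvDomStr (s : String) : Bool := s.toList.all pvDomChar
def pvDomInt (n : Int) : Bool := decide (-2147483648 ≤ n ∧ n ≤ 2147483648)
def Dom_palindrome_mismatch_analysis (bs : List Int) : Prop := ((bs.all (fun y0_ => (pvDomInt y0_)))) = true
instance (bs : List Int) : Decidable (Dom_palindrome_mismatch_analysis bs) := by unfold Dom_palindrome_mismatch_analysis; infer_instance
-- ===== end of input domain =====

-- B replaces A's reversed copy and full-range scan by a two-pointer loop walking inward
-- from both ends; same O(n) cost, half the comparisons, no reversed copy.

-- ===== PORT A =====
def palindrome_mismatch_analysis (bs : List Int) : List Int :=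
  let n : Int := bs.length
  let rev : List Int := bs.reverse     -- bs[::-1]
  (PySem.List.pyRange 0 n 1).foldl
    (fun mismatches i =>
      if PySem.List.pyGet? bs i ≠ PySem.List.pyGet? rev i then mismatches ++ [i] else mismatches)
    []

-- ===== PORT B =====
-- the while loop of Source B: state (i, j, left, right); runs while i < j
def pvTwoPointer (bs : List Int) (i j : Int) (left right : List Int) : List Int :=
  if h : i < j then
    if PySem.List.pyGet? bs i ≠ PySem.List.pyGet? bs j then
      pvTwoPointer bs (i + 1) (j - 1) (left ++ [i]) (right ++ [j])
    else
      pvTwoPointer bs (i + 1) (j - 1) left right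
  else
    left ++ right.reverse              -- right.reverse(); return left + right
termination_by (j - i).toNat
decreasing_by all_goals omega

def palindrome_mismatch_analysis_alt (bs : List Int) : List Int :=
  pvTwoPointer bs 0 ((bs.length : Int) - 1) [] []

-- ===== PRECONDITION & SPEC =====
def Spec_palindrome_mismatch_analysis (bs : List Int) (out : List Int) : Prop := out = palindrome_mismatch_analysis_alt bs
instance (bs : List Int) (out : List Int) : Decidable (Spec_palindrome_mismatch_analysis bs out) := by unfold Spec_palindrome_mismatch_analysis; infer_instance

-- ===== CLAIM (what is proved, stated in full; the proofs are below) =====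
def Claim_equal_palindrome_mismatch_analysis : Prop := ∀ (bs : List Int), Dom_palindrome_mismatch_analysis bs → Spec_palindrome_mismatch_analysis bs (palindrome_mismatch_analysis bs)

-- ===== LEMMAS AND PROOFS =====

-- reversed-list indexing: rev[i] = bs[n-1-i] for in-range i
theorem pvRevGet (bs : List Int) (i : Int) (h0 : 0 ≤ i) (h1 : i < (bs.length : Int)) :
    PySem.List.pyGet? bs.reverse i = PySem.List.pyGet? bs ((bs.length : Int) - 1 - i) := by
  rw [PySem.List.pyGet?_of_nonneg _ h0,
    PySem.List.pyGet?_of_nonneg _ (by omega : (0:Int) ≤ (bs.length : Int) - 1 - i)]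
  have hi : i.toNat < bs.length := by omega
  have ht : ((bs.length : Int) - 1 - i).toNat = bs.length - 1 - i.toNat := by omega
  rw [ht, List.getElem?_reverse hi]

-- the two-pointer loop, run with the invariant j = n-1-i, computes the filtered
-- first-half range and its mirrored map
theorem pvTwoPointerEq (bs : List Int) :
    ∀ (k : Nat) (i : Int) (left right : List Int), 0 ≤ i →
      ((bs.length : Int) / 2 - i).toNat ≤ k →
      pvTwoPointer bs i ((bs.length : Int) - 1 - i) left right
        = (left ++ (PySem.List.pyRange i ((bs.length : Int) / 2) 1).filter
              (fun t => decide (PySem.List.pyGet? bs t ≠ PySem.List.pyGet? bs ((bs.length : Int) - 1 - t))))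
          ++ (right ++ ((PySem.List.pyRange i ((bs.length : Int) / 2) 1).filter
              (fun t => decide (PySem.List.pyGet? bs t ≠ PySem.List.pyGet? bs ((bs.length : Int) - 1 - t)))).map
              (fun t => (bs.length : Int) - 1 - t)).reverse := by
  intro k
  induction k with
  | zero =>
    intro i left right h0 hk
    have hm : (bs.length : Int) / 2 ≤ i := by omega
    have hnj : ¬ (i < (bs.length : Int) - 1 - i) := by omega
    rw [pvTwoPointer, dif_neg hnj, PySem.List.pyRange_one_eq_nil hm]
    simp
  | succ k ih =>
    intro i left right h0 hk
    by_cases hm : (bs.length : Int) / 2 ≤ i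
    · have hnj : ¬ (i < (bs.length : Int) - 1 - i) := by omega
      rw [pvTwoPointer, dif_neg hnj, PySem.List.pyRange_one_eq_nil hm]
      simp
    · have hij : i < (bs.length : Int) - 1 - i := by omega
      have hstep : (bs.length : Int) - 1 - i - 1 = (bs.length : Int) - 1 - (i + 1) := by ring
      rw [pvTwoPointer, dif_pos hij, PySem.List.pyRange_one_cons (by omega : i < (bs.length : Int) / 2)]
      by_cases hc : PySem.List.pyGet? bs i ≠ PySem.List.pyGet? bs ((bs.length : Int) - 1 - i)
      · rw [if_pos hc, hstep, ih (i + 1) (left ++ [i]) (right ++ [(bs.length : Int) - 1 - i])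
            (by omega) (by omega)]
        simp [hc]
      · rw [if_neg hc, hstep, ih (i + 1) left right (by omega) (by omega)]
        simp [hc]

theorem palindrome_mismatch_analysis_eq (bs : List Int) :
    palindrome_mismatch_analysis bs = palindrome_mismatch_analysis_alt bs := by
  -- B's side: the two-pointer loop in normal form
  have hB : palindrome_mismatch_analysis_alt bs
      = (PySem.List.pyRange 0 ((bs.length : Int) / 2) 1).filter
            (fun t => decide (PySem.List.pyGet? bs t ≠ PySem.List.pyGet? bs ((bs.length : Int) - 1 - t)))
        ++ (((PySem.List.pyRange 0 ((bs.length : Int) / 2) 1).filter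
            (fun t => decide (PySem.List.pyGet? bs t ≠ PySem.List.pyGet? bs ((bs.length : Int) - 1 - t)))).map
            (fun t => (bs.length : Int) - 1 - t)).reverse := by
    have h := pvTwoPointerEq bs ((bs.length : Int) / 2).toNat 0 [] [] le_rfl (by omega)
    simpa [palindrome_mismatch_analysis_alt] using h
  -- A's side
  rw [hB]
  simp only [palindrome_mismatch_analysis]
  rw [PySem.List.foldl_append_ite_eq_filter]
  simp only [List.nil_append]
  set n : Int := (bs.length : Int) with hn
  have hn0 : 0 ≤ n := by positivity
  set m : Int := n / 2 with hm
  have hm0 : 0 ≤ m := by omega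
  have hmn : m ≤ n := by omega
  set p : Int → Bool := fun i =>
    decide (PySem.List.pyGet? bs i ≠ PySem.List.pyGet? bs.reverse i) with hp
  set q : Int → Bool := fun i =>
    decide (PySem.List.pyGet? bs i ≠ PySem.List.pyGet? bs (n - 1 - i)) with hq
  set g : Int → Int := fun i => n - 1 - i with hg
  -- split the full range at m
  rw [PySem.List.pyRange_one_append 0 m n hm0 hmn, List.filter_append]
  -- first half: p agrees with q there
  have hfirst : (PySem.List.pyRange 0 m 1).filter p = (PySem.List.pyRange 0 m 1).filter q := by
    apply List.filter_congr
    intro i hi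
    rw [PySem.List.mem_pyRange_one] at hi
    simp only [hp, hq]
    rw [pvRevGet bs i hi.1 (by omega)]
  -- second half is the mirrored reverse of range(0, n-m)
  have hsecond : PySem.List.pyRange m n 1
      = ((PySem.List.pyRange 0 (n - m) 1).map g).reverse := by
    apply List.ext_getElem
    · simp [PySem.List.length_pyRange_one]
    · intro k hk hk'
      simp only [List.length_reverse, List.length_map, PySem.List.length_pyRange_one] at hk hk'
      simp only [List.getElem_reverse, List.getElem_map, List.length_map,
        PySem.List.length_pyRange_one]
      rw [PySem.List.getElem_pyRange_one, PySem.List.getElem_pyRange_one]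
      simp only [hg]
      omega
  have hmirror : ∀ j : Int, 0 ≤ j → j < m → p (g j) = q j := by
    intro j hj0 hjm
    simp only [hp, hq, hg]
    rw [pvRevGet bs (n - 1 - j) (by omega) (by omega)]
    have h2 : n - 1 - (n - 1 - j) = j := by ring
    rw [h2]
    simp [ne_comm]
  have hfilter2 : (PySem.List.pyRange 0 (n - m) 1).filter (fun j => p (g j))
      = (PySem.List.pyRange 0 m 1).filter q := by
    have hcase : n - m = m ∨ n - m = m + 1 := by omega
    rcases hcase with hc | hc
    · rw [hc]
      exact List.filter_congr fun j hj => by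
        rw [PySem.List.mem_pyRange_one] at hj
        exact hmirror j hj.1 hj.2
    · rw [hc, PySem.List.pyRange_one_succ_right hm0, List.filter_append]
      have hmm : g m = m := by simp only [hg]; omega
      have hmidv : (([m] : List Int)).filter (fun j => p (g j)) = [] := by
        have hrev : PySem.List.pyGet? bs.reverse m = PySem.List.pyGet? bs m := by
          rw [pvRevGet bs m hm0 (by omega)]
          have h3 : n - 1 - m = m := by omega
          rw [h3]
        simp [List.filter, hmm, hp, hrev]
      rw [hmidv, List.append_nil]
      exact List.filter_congr fun j hj => by
        rw [PySem.List.mem_pyRange_one] at hj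
        exact hmirror j hj.1 hj.2
  have hcomp : ((PySem.List.pyRange 0 (n - m) 1).filter (p ∘ g))
      = (PySem.List.pyRange 0 m 1).filter q := by
    rw [← hfilter2]; rfl
  rw [hfirst, hsecond, List.filter_reverse, List.filter_map, hcomp]

-- ===== VERDICT (by name: the statement is the Claim_ definition above) =====
theorem palindrome_mismatch_analysis_spec : Claim_equal_palindrome_mismatch_analysis := by
  intro bs _
  show palindrome_mismatch_analysis bs = palindrome_mismatch_analysis_alt bs
  exact palindrome_mismatch_analysis_eq bs
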